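-- pv_equiv track=rewrite | github.com/eternalclash/CODING-TEST | 이상준/테이블 해시 함수.py | solution
-- ===== SOURCE A (Python) =====
-- def solution(data, col, row_begin, row_end):
--     answer = 0
--
--     data.sort(key = lambda x:(x[col-1], -x[0]))
--
--     stack = []
--
--     for i, d in enumerate(data, start=1):
--         temp = 0
--         for elem in d:
--             temp += elem%i
--         stack.append(temp)
--
--     for s in stack[row_begin-1: row_end]:
--         answer ^= s
--
--     return answer
-- ===== SOURCE B (Python) =====
-- def solution(data, col, row_begin, row_end):
--     # sorts data in place, like the original
--     data.sort(key=lambda x: (x[col - 1], -x[0]))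
--     start, stop, _ = slice(row_begin - 1, row_end).indices(len(data))
--     answer = 0
--     for i in range(start, stop):
--         answer ^= sum(elem % (i + 1) for elem in data[i])
--     return answer
-- ===== Notes on version B (the rewrite author's own statement) =====
-- stated objective: simpler
-- what changed: B fuses A's two passes (building the stack list, then XOR-ing a slice of it) into one loop: it normalises the slice bounds once with slice.indices and XORs each selected row's hash directly, never materialising the intermediate list.
import Mathlib
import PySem

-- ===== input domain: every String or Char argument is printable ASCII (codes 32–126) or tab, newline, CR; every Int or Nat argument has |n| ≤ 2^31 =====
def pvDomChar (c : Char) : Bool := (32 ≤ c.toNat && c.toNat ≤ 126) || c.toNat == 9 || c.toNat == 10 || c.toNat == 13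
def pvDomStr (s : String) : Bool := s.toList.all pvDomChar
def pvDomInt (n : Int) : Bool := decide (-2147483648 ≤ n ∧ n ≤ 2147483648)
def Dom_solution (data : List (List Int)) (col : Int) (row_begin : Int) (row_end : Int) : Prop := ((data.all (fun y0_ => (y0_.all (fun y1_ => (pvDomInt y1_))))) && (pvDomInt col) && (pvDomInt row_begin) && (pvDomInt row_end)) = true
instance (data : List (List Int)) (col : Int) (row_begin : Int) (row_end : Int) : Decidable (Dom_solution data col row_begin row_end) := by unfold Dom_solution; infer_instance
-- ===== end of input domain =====

-- B fuses A's build-stack pass and XOR-slice pass into one index loop over the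
-- normalised slice bounds (simpler: no intermediate list). Both A and B sort
-- `data` in place with the same key; the theorems are about the return value.

-- ===== PORT A =====
def solution (data : List (List Int)) (col : Int) (row_begin : Int) (row_end : Int) : Int :=
  let sortedData := PySem.List.sorted2 data
    (fun x => (PySem.List.pyGet? x (col - 1)).getD 0)
    (fun x => -((PySem.List.pyGet? x 0).getD 0))
  let stack := (PySem.List.enumerate sortedData 1).foldl
    (fun st p => st ++ [p.2.foldl (fun temp elem => temp + PySem.Int.mod elem p.1) 0]) []
  (PySem.List.slice stack (some (row_begin - 1)) (some row_end)).foldl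
    (fun answer s => PySem.Int.bxor answer s) 0

-- ===== PORT B =====
def solution_alt (data : List (List Int)) (col : Int) (row_begin : Int) (row_end : Int) : Int :=
  let sortedData := PySem.List.sorted2 data
    (fun x => (PySem.List.pyGet? x (col - 1)).getD 0)
    (fun x => -((PySem.List.pyGet? x 0).getD 0))
  -- slice(row_begin-1, row_end).indices(len(data)) for step 1 is exactly clampIdx
  let start := PySem.List.clampIdx sortedData.length (row_begin - 1)
  let stop := PySem.List.clampIdx sortedData.length row_end
  (PySem.List.pyRange (start : Int) (stop : Int) 1).foldl
    (fun answer i => PySem.Int.bxor answer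
      ((PySem.List.pyGetD sortedData i []).foldl
        (fun t e => t + PySem.Int.mod e (i + 1)) 0)) 0

-- ===== PRECONDITION & SPEC =====
-- Pre_ excludes exactly the inputs on which Python A raises IndexError in the
-- sort key: some row for which x[col-1] (or x[0]) is out of range.
def Pre_solution (data : List (List Int)) (col : Int) (row_begin : Int) (row_end : Int) : Prop :=
  ∀ row ∈ data, PySem.Raise.InRange row.length (col - 1)
instance (data : List (List Int)) (col : Int) (row_begin : Int) (row_end : Int) : Decidable (Pre_solution data col row_begin row_end) := by unfold Pre_solution; infer_instance
def pvWitness_solution : List (List Int) × Int × Int × Int := ([[1, 2], [3, 4]], 1, 1, 2)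

def Spec_solution (data : List (List Int)) (col : Int) (row_begin : Int) (row_end : Int) (out : Int) : Prop := out = solution_alt data col row_begin row_end
instance (data : List (List Int)) (col : Int) (row_begin : Int) (row_end : Int) (out : Int) : Decidable (Spec_solution data col row_begin row_end out) := by unfold Spec_solution; infer_instance

-- ===== CLAIM (what is proved, stated in full; the proofs are below) =====
def Claim_equal_solution : Prop := ∀ (data : List (List Int)) (col : Int) (row_begin : Int) (row_end : Int), Dom_solution data col row_begin row_end → Pre_solution data col row_begin row_end → Spec_solution data col row_begin row_end (solution data col row_begin row_end)

-- ===== LEMMAS AND PROOFS =====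

-- A's stack-building fold is a map over the enumeration.
theorem pv_foldl_append (l : List (Int × List Int)) (init : List Int)
    (h : Int × List Int → Int) :
    l.foldl (fun st p => st ++ [h p]) init = init ++ l.map h := by
  induction l generalizing init with
  | nil => simp
  | cons p t ih => simp [List.foldl_cons, ih]

-- The sliced enumeration, elementwise.
theorem pv_slice_enum (xs : List (List Int)) (A B : Nat)
    (hA : A ≤ xs.length) (hB : B ≤ xs.length) :
    ((PySem.List.enumerate xs 1).drop A).take (B - A)
      = (PySem.List.pyRange (A : Int) (B : Int) 1).map
          (fun i => (i + 1, PySem.List.pyGetD xs i [])) := by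
  apply List.ext_getElem
  · simp [PySem.List.length_pyRange_one, PySem.List.length_enumerate]
    omega
  · intro k h1 h2
    have hk : k < B - A := by
      simp only [List.length_take, List.length_drop, PySem.List.length_enumerate] at h1
      omega
    have hlt : A + k < xs.length := by omega
    have henum : A + k < (PySem.List.enumerate xs 1).length := by
      simpa [PySem.List.length_enumerate] using hlt
    simp only [List.getElem_take, List.getElem_drop, List.getElem_map]
    rw [PySem.List.getElem_enumerate, PySem.List.getElem_pyRange_one]
    have hget : PySem.List.pyGetD xs ((A : Int) + (k : Int)) [] = xs[A + k] := by
      have h3 : ((A : Int) + (k : Int)).toNat = A + k := by omega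
      rw [PySem.List.pyGetD_of_nonneg xs [] (by positivity), h3]
      exact List.getD_eq_getElem xs [] hlt
    rw [hget]
    exact Prod.ext (by push_cast; ring) rfl

-- The core equality, for the already-sorted table.
theorem pv_core (xs : List (List Int)) (rb re : Int) :
    (PySem.List.slice
        ((PySem.List.enumerate xs 1).foldl
          (fun st p => st ++ [p.2.foldl (fun temp elem => temp + PySem.Int.mod elem p.1) 0]) [])
        (some (rb - 1)) (some re)).foldl (fun answer s => PySem.Int.bxor answer s) 0
    = (PySem.List.pyRange ((PySem.List.clampIdx xs.length (rb - 1)) : Int)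
        ((PySem.List.clampIdx xs.length re) : Int) 1).foldl
        (fun answer i => PySem.Int.bxor answer
          ((PySem.List.pyGetD xs i []).foldl
            (fun t e => t + PySem.Int.mod e (i + 1)) 0)) 0 := by
  rw [pv_foldl_append]
  set h : Int × List Int → Int :=
    fun p => p.2.foldl (fun temp elem => temp + PySem.Int.mod elem p.1) 0 with hh
  have hlen : ((PySem.List.enumerate xs 1).map h).length = xs.length := by
    simp [PySem.List.length_enumerate]
  set A := PySem.List.clampIdx xs.length (rb - 1) with hA
  set B := PySem.List.clampIdx xs.length re with hB
  have hslice : PySem.List.slice ((PySem.List.enumerate xs 1).map h)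
      (some (rb - 1)) (some re)
      = (((PySem.List.enumerate xs 1).map h).drop A).take (B - A) := by
    simp only [PySem.List.slice, hlen, hA, hB]
  rw [List.nil_append, hslice, ← List.map_drop, ← List.map_take]
  rw [pv_slice_enum xs A B (by rw [hA]; exact PySem.List.clampIdx_le _ _)
        (by rw [hB]; exact PySem.List.clampIdx_le _ _)]
  rw [List.map_map, List.foldl_map]
  rfl

-- ===== VERDICT (by name: the statement is the Claim_ definition above) =====
theorem solution_spec : Claim_equal_solution := by
  intro data col row_begin row_end _ _
  unfold Spec_solution solution solution_alt
  exact pv_core _ row_begin row_end
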